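-- pv_equiv track=rewrite | github.com/sl-harris/aoc-2024 | day8/main.py | find_resonant
-- ===== SOURCE A (Python) =====
-- def find_resonant(combos, distances, grid):
--     antinodes = {}
--
--     for key in combos.keys():
--         antinodes.setdefault(key, [])
--         for ((start_x, start_y), (end_x, end_y)), (dist_x, dist_y) in zip(
--             combos[key], distances[key]
--         ):
--             antinodes[key] += find_resonant_until_border(
--                 start_x, start_y, -dist_x, -dist_y, grid
--             )
--             antinodes[key] += find_resonant_until_border(
--                 end_x, end_y, dist_x, dist_y, grid
--             )
--
--     return antinodes
--
-- def find_resonant_until_border(coord_x, coord_y, dist_x, dist_y, grid):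
--     resonants = []
--
--     while True:
--         coord_x += dist_x
--         coord_y += dist_y
--
--         if not is_valid_coord((coord_x, coord_y), grid):
--             break
--
--         resonants.append((coord_x, coord_y))
--
--     return resonants
--
-- def is_valid_coord(coord, grid):
--     return (0 <= coord[0] < len(grid)) and (0 <= coord[1] < len(grid[0]))
-- ===== SOURCE B (Python) =====
-- def find_resonant(combos, distances, grid):
--     # Closed-form rays: instead of walking step by step until the border,
--     # compute the number of in-grid steps K arithmetically and emit the
--     # K points directly.
--     n = len(grid)
--     m = len(grid[0]) if grid else 0
--
--     def cap(p, d, size):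
--         # Largest k (None = unbounded) such that 0 <= p + i*d < size for all 1 <= i <= k.
--         if d == 0:
--             return None if 0 <= p < size else 0
--         if d > 0:
--             return 0 if p + d < 0 else max((size - 1 - p) // d, 0)
--         return 0 if p + d >= size else max(p // (-d), 0)
--
--     def ray(x, y, dx, dy):
--         kx = cap(x, dx, n)
--         ky = cap(y, dy, m)
--         k = ky if kx is None else kx if ky is None else min(kx, ky)
--         if k is None:
--             k = 0
--         return [(x + i * dx, y + i * dy) for i in range(1, k + 1)]
--
--     out = {}
--     for key in combos:
--         out[key] = [pt
--                     for (s, e), (dx, dy) in zip(combos[key], distances[key])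
--                     for pt in ray(s[0], s[1], -dx, -dy) + ray(e[0], e[1], dx, dy)]
--     return out
-- ===== Notes on version B (the rewrite author's own statement) =====
-- stated objective: alternative
-- what changed: The while-loop walk of find_resonant_until_border is replaced by a closed-form per-axis step count (floor divisions) from which the ray's points are emitted directly; each key's result is built as a single comprehension and assigned once instead of setdefault plus repeated in-place +=.
import Mathlib
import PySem

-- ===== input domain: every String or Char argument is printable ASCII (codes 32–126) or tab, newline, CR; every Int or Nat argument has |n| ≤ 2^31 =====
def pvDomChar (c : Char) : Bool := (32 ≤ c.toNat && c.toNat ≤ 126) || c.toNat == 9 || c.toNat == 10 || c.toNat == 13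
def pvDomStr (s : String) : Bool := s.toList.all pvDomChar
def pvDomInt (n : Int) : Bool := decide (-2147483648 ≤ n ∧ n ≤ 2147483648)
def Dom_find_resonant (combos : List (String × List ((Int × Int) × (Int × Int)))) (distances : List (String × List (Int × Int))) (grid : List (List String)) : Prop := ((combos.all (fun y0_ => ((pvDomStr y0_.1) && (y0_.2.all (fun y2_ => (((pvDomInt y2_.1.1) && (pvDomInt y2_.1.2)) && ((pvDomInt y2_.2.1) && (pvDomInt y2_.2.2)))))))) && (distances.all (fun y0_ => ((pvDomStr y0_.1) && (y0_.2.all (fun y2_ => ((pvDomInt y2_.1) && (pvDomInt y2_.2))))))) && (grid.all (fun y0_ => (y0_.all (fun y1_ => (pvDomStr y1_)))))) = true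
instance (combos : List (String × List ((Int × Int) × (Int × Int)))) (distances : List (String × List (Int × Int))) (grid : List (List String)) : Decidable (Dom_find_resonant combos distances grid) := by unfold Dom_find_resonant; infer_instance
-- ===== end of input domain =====

-- B replaces A's step-by-step while-loop walk to the border by a closed-form step count
-- per ray (objective: alternative decomposition; arithmetic instead of iteration).


-- ===== PORT A =====
-- is_valid_coord; grid[0] is only reached by Python when 0 <= x < len(grid), so grid is
-- nonempty there and `grid.headD []` is exact.
def pvValid (c : Int × Int) (grid : List (List String)) : Bool :=
  (decide (0 ≤ c.1) && decide (c.1 < (grid.length : Int))) &&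
  (decide (0 ≤ c.2) && decide (c.2 < ((grid.headD []).length : Int)))

-- find_resonant_until_border: the while-loop, with a fuel bound (grid.length + row + 2
-- steps always suffice on inputs admitted by Pre_, where the loop terminates).
def pvUntilBorder (fuel : Nat) (x y dx dy : Int) (grid : List (List String)) : List (Int × Int) :=
  match fuel with
  | 0 => []
  | f + 1 =>
    let x' := x + dx
    let y' := y + dy
    if pvValid (x', y') grid then (x', y') :: pvUntilBorder f x' y' dx dy grid else []

def find_resonant (combos : List (String × List ((Int × Int) × (Int × Int)))) (distances : List (String × List (Int × Int))) (grid : List (List String)) : List (String × List (Int × Int)) :=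
  let fuel := grid.length + (grid.headD []).length + 2
  ((combos.map Prod.fst).foldl
    (fun (an : PySem.Dict String (List (Int × Int))) key =>
      (List.zip ((PySem.Dict.mk combos).getD key []) ((PySem.Dict.mk distances).getD key [])).foldl
        (fun a pr =>
          (a.modify key [] (· ++ pvUntilBorder fuel pr.1.1.1 pr.1.1.2 (-pr.2.1) (-pr.2.2) grid)).modify key []
            (· ++ pvUntilBorder fuel pr.1.2.1 pr.1.2.2 pr.2.1 pr.2.2 grid))
        (an.setdefault key []))
    PySem.Dict.empty).items

-- ===== PORT B =====
-- cap: largest k (none = unbounded) with 0 <= p + i*d < size for all 1 <= i <= k.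
def pvAxisCap (p d size : Int) : Option Int :=
  if d = 0 then (if 0 ≤ p ∧ p < size then none else some 0)
  else if 0 < d then (if p + d < 0 then some 0 else some (max (PySem.Int.floordiv (size - 1 - p) d) 0))
  else (if size ≤ p + d then some 0 else some (max (PySem.Int.floordiv p (-d)) 0))

def pvRay (x y dx dy n m : Int) : List (Int × Int) :=
  let k : Int :=
    match pvAxisCap x dx n, pvAxisCap y dy m with
    | none, none => 0
    | none, some b => b
    | some a, none => a
    | some a, some b => min a b
  (PySem.List.pyRange 1 (k + 1) 1).map (fun i => (x + i * dx, y + i * dy))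

def find_resonant_alt (combos : List (String × List ((Int × Int) × (Int × Int)))) (distances : List (String × List (Int × Int))) (grid : List (List String)) : List (String × List (Int × Int)) :=
  let n : Int := grid.length
  let m : Int := if grid.isEmpty then 0 else ((grid.headD []).length : Int)
  ((combos.map Prod.fst).foldl
    (fun (out : PySem.Dict String (List (Int × Int))) key =>
      out.insert key
        ((List.zip ((PySem.Dict.mk combos).getD key []) ((PySem.Dict.mk distances).getD key [])).flatMap
          (fun pr => pvRay pr.1.1.1 pr.1.1.2 (-pr.2.1) (-pr.2.2) n m ++ pvRay pr.1.2.1 pr.1.2.2 pr.2.1 pr.2.2 n m)))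
    PySem.Dict.empty).items

-- ===== PRECONDITION & SPEC =====
-- Pre_ excludes: association lists with duplicate combos keys (unrepresentable as a Python
-- dict); inputs whose combos has a key missing from distances (A raises KeyError there);
-- and zipped pairs with distance (0,0) and an endpoint inside the grid (A's while-loop
-- never terminates there).
def Pre_find_resonant (combos : List (String × List ((Int × Int) × (Int × Int)))) (distances : List (String × List (Int × Int))) (grid : List (List String)) : Prop :=
  (combos.map Prod.fst).Nodup ∧
  ∀ key ∈ combos.map Prod.fst,
    ((PySem.Dict.mk distances).get? key).isSome = true ∧
    ∀ pr ∈ List.zip ((PySem.Dict.mk combos).getD key []) ((PySem.Dict.mk distances).getD key []),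
      pr.2 = ((0 : Int), (0 : Int)) →
        ¬ (0 ≤ pr.1.1.1 ∧ pr.1.1.1 < (grid.length : Int) ∧ 0 ≤ pr.1.1.2 ∧ pr.1.1.2 < ((grid.headD []).length : Int)) ∧
        ¬ (0 ≤ pr.1.2.1 ∧ pr.1.2.1 < (grid.length : Int) ∧ 0 ≤ pr.1.2.2 ∧ pr.1.2.2 < ((grid.headD []).length : Int))

instance (combos : List (String × List ((Int × Int) × (Int × Int)))) (distances : List (String × List (Int × Int))) (grid : List (List String)) : Decidable (Pre_find_resonant combos distances grid) := by unfold Pre_find_resonant; infer_instance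

def pvWitness_find_resonant : (List (String × List ((Int × Int) × (Int × Int)))) × (List (String × List (Int × Int))) × List (List String) :=
  ([("a", [(((0 : Int), (0 : Int)), ((1 : Int), (1 : Int)))])], [("a", [((1 : Int), (1 : Int))])], [["."], ["."], ["."]])

def Spec_find_resonant (combos : List (String × List ((Int × Int) × (Int × Int)))) (distances : List (String × List (Int × Int))) (grid : List (List String)) (out : List (String × List (Int × Int))) : Prop := out = find_resonant_alt combos distances grid
instance (combos : List (String × List ((Int × Int) × (Int × Int)))) (distances : List (String × List (Int × Int))) (grid : List (List String)) (out : List (String × List (Int × Int))) : Decidable (Spec_find_resonant combos distances grid out) := by unfold Spec_find_resonant; infer_instance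

-- ===== CLAIM (what is proved, stated in full; the proofs are below) =====
def Claim_equal_find_resonant : Prop := ∀ (combos : List (String × List ((Int × Int) × (Int × Int)))) (distances : List (String × List (Int × Int))) (grid : List (List String)), Dom_find_resonant combos distances grid → Pre_find_resonant combos distances grid → Spec_find_resonant combos distances grid (find_resonant combos distances grid)

-- ===== LEMMAS AND PROOFS =====

-- proof-side abbreviation for "coordinate inside the grid" (definitionally the
-- conjunction spelled out in Pre_find_resonant)
def pvInGrid (c : Int × Int) (grid : List (List String)) : Prop :=
  0 ≤ c.1 ∧ c.1 < (grid.length : Int) ∧ 0 ≤ c.2 ∧ c.2 < ((grid.headD []).length : Int)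

theorem pvModify_eq_insert {ν : Type} (d : PySem.Dict String ν) (k : String) (d0 : ν) (f : ν → ν) :
    d.modify k d0 f = d.insert k (f (d.getD k d0)) := rfl

theorem pvValid_true_iff (c : Int × Int) (grid : List (List String)) :
    pvValid c grid = true ↔ pvInGrid c grid := by
  simp [pvValid, pvInGrid, and_assoc]

theorem pvValid_false_iff (c : Int × Int) (grid : List (List String)) :
    pvValid c grid = false ↔ ¬ pvInGrid c grid := by
  rw [Bool.eq_false_iff]
  exact not_congr (pvValid_true_iff c grid)

theorem pvCap_none (p d size : Int) (h : pvAxisCap p d size = none) :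
    d = 0 ∧ 0 ≤ p ∧ p < size := by
  unfold pvAxisCap at h
  split_ifs at h with h1 h2 <;> simp_all

theorem pvCap_nonneg (p d size c : Int) (h : pvAxisCap p d size = some c) : 0 ≤ c := by
  unfold pvAxisCap at h
  split_ifs at h <;> simp_all <;> omega

theorem pvCap_valid (p d size c : Int) (h : pvAxisCap p d size = some c)
    (j : Int) (h1 : 1 ≤ j) (h2 : j ≤ c) : 0 ≤ p + j * d ∧ p + j * d < size := by
  unfold pvAxisCap at h
  by_cases hd : d = 0
  · rw [if_pos hd] at h
    by_cases hr : 0 ≤ p ∧ p < size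
    · rw [if_pos hr] at h; cases h
    · rw [if_neg hr] at h; injection h with h; omega
  · rw [if_neg hd] at h
    by_cases hpos : 0 < d
    · rw [if_pos hpos] at h
      by_cases hlow : p + d < 0
      · rw [if_pos hlow] at h; injection h with h; omega
      · rw [if_neg hlow] at h; injection h with h
        have hjF : j ≤ PySem.Int.floordiv (size - 1 - p) d := by
          rcases max_cases (PySem.Int.floordiv (size - 1 - p) d) (0 : Int) with
            ⟨he, hge⟩ | ⟨he, hlt⟩ <;> omega
        have hmul : j * d ≤ size - 1 - p := (PySem.Int.le_floordiv_iff_mul_le hpos).mp hjF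
        have hone : (0 : Int) ≤ (j - 1) * d := mul_nonneg (by omega) (le_of_lt hpos)
        constructor <;> nlinarith
    · rw [if_neg hpos] at h
      have hdneg : d < 0 := by omega
      by_cases hup : size ≤ p + d
      · rw [if_pos hup] at h; injection h with h; omega
      · rw [if_neg hup] at h; injection h with h
        have hjF : j ≤ PySem.Int.floordiv p (-d) := by
          rcases max_cases (PySem.Int.floordiv p (-d)) (0 : Int) with
            ⟨he, hge⟩ | ⟨he, hlt⟩ <;> omega
        have hmul : j * (-d) ≤ p := (PySem.Int.le_floordiv_iff_mul_le (by omega)).mp hjF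
        have hone : (0 : Int) ≤ (j - 1) * (-d) := mul_nonneg (by omega) (by omega)
        constructor <;> nlinarith

theorem pvCap_fail (p d size c : Int) (h : pvAxisCap p d size = some c) :
    ¬ (0 ≤ p + (c + 1) * d ∧ p + (c + 1) * d < size) := by
  unfold pvAxisCap at h
  by_cases hd : d = 0
  · subst hd
    rw [if_pos rfl] at h
    by_cases hr : 0 ≤ p ∧ p < size
    · rw [if_pos hr] at h; cases h
    · rw [if_neg hr] at h; injection h with h
      rintro ⟨ha, hb⟩
      exact hr ⟨by omega, by omega⟩
  · rw [if_neg hd] at h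
    by_cases hpos : 0 < d
    · rw [if_pos hpos] at h
      by_cases hlow : p + d < 0
      · rw [if_pos hlow] at h; injection h with h
        have hc0 : c = 0 := h.symm
        subst hc0
        rintro ⟨ha, _⟩; omega
      · rw [if_neg hlow] at h; injection h with h
        have hFlt : PySem.Int.floordiv (size - 1 - p) d < c + 1 := by
          rcases max_cases (PySem.Int.floordiv (size - 1 - p) d) (0 : Int) with
            ⟨he, hge⟩ | ⟨he, hlt⟩ <;> omega
        have hmul := (PySem.Int.floordiv_lt_iff_lt_mul hpos).mp hFlt
        have hmul' := Int.lt_iff_add_one_le.mp hmul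
        rintro ⟨_, hb⟩
        linarith
    · rw [if_neg hpos] at h
      have hdneg : d < 0 := by omega
      by_cases hup : size ≤ p + d
      · rw [if_pos hup] at h; injection h with h
        have hc0 : c = 0 := h.symm
        subst hc0
        rintro ⟨_, hb⟩; omega
      · rw [if_neg hup] at h; injection h with h
        have hFlt : PySem.Int.floordiv p (-d) < c + 1 := by
          rcases max_cases (PySem.Int.floordiv p (-d)) (0 : Int) with
            ⟨he, hge⟩ | ⟨he, hlt⟩ <;> omega
        have hmul := (PySem.Int.floordiv_lt_iff_lt_mul (by omega : (0:Int) < -d)).mp hFlt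
        have hneg : (c + 1) * -d = -((c + 1) * d) := by ring
        rintro ⟨ha, _⟩
        linarith [hmul, hneg ▸ hmul]

theorem pvCap_le (p d size c : Int) (h : pvAxisCap p d size = some c)
    (hs : 0 ≤ size) : c ≤ size := by
  rcases (by omega : c ≤ 0 ∨ 1 ≤ c) with hc | hc
  · omega
  · have hd : d ≠ 0 := by
      intro hd0
      unfold pvAxisCap at h
      rw [if_pos hd0] at h
      by_cases hr : 0 ≤ p ∧ p < size
      · rw [if_pos hr] at h; cases h
      · rw [if_neg hr] at h; injection h with h; omega
    have h1 := pvCap_valid p d size c h 1 le_rfl hc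
    have h2 := pvCap_valid p d size c h c hc le_rfl
    rw [one_mul] at h1
    rcases lt_or_gt_of_ne hd with hneg | hpos
    · have hkey : (c - 1) * 1 ≤ (c - 1) * (-d) :=
        mul_le_mul_of_nonneg_left (by omega) (by omega)
      nlinarith
    · have hkey : (c - 1) * 1 ≤ (c - 1) * d :=
        mul_le_mul_of_nonneg_left (by omega) (by omega)
      nlinarith

theorem pvWalk_eq (grid : List (List String)) (dx dy : Int) :
    ∀ (fuel K : Nat) (x y : Int), K < fuel →
    (∀ j : Nat, j < K → pvValid (x + ((j : Int) + 1) * dx, y + ((j : Int) + 1) * dy) grid = true) →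
    pvValid (x + ((K : Int) + 1) * dx, y + ((K : Int) + 1) * dy) grid = false →
    pvUntilBorder fuel x y dx dy grid
      = (List.range K).map (fun (j : Nat) => ((x + ((j : Int) + 1) * dx, y + ((j : Int) + 1) * dy) : Int × Int)) := by
  intro fuel
  induction fuel with
  | zero => intro K x y hK _ _; exact absurd hK (Nat.not_lt_zero K)
  | succ f ih =>
    intro K x y hK hval hfail
    cases K with
    | zero =>
      have hf : pvValid (x + dx, y + dy) grid = false := by
        have := hfail; norm_num at this; exact this
      simp [pvUntilBorder, hf]
    | succ K' =>
      have hv : pvValid (x + dx, y + dy) grid = true := by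
        have := hval 0 (Nat.succ_pos K'); norm_num at this; exact this
      rw [show pvUntilBorder (f + 1) x y dx dy grid
            = (x + dx, y + dy) :: pvUntilBorder f (x + dx) (y + dy) dx dy grid from by
          simp [pvUntilBorder, hv]]
      have hval' : ∀ j : Nat, j < K' →
          pvValid ((x + dx) + ((j : Int) + 1) * dx, (y + dy) + ((j : Int) + 1) * dy) grid = true := by
        intro j hj
        have hx : (x + dx) + ((j : Int) + 1) * dx = x + (((j + 1 : Nat) : Int) + 1) * dx := by
          push_cast; ring
        have hy : (y + dy) + ((j : Int) + 1) * dy = y + (((j + 1 : Nat) : Int) + 1) * dy := by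
          push_cast; ring
        rw [hx, hy]; exact hval (j + 1) (by omega)
      have hfail' :
          pvValid ((x + dx) + ((K' : Int) + 1) * dx, (y + dy) + ((K' : Int) + 1) * dy) grid = false := by
        have hx : (x + dx) + ((K' : Int) + 1) * dx = x + (((K' + 1 : Nat) : Int) + 1) * dx := by
          push_cast; ring
        have hy : (y + dy) + ((K' : Int) + 1) * dy = y + (((K' + 1 : Nat) : Int) + 1) * dy := by
          push_cast; ring
        rw [hx, hy]; exact hfail
      rw [ih K' (x + dx) (y + dy) (by omega) hval' hfail']
      rw [List.range_succ_eq_map, List.map_cons, List.map_map]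
      refine congrArg₂ List.cons ?_ ?_
      · simp only [Prod.mk.injEq]
        constructor <;> (push_cast; ring)
      · apply List.map_congr_left
        intro j _
        simp only [Function.comp_apply, Prod.mk.injEq]
        constructor <;> (push_cast; ring)

theorem pvClose (grid : List (List String)) (x y dx dy k : Int)
    (A1 : 0 ≤ k)
    (A2 : ∀ j : Int, 1 ≤ j → j ≤ k → pvValid (x + j * dx, y + j * dy) grid = true)
    (A3 : pvValid (x + (k + 1) * dx, y + (k + 1) * dy) grid = false)
    (A4 : k ≤ (grid.length : Int) + ((grid.headD []).length : Int)) :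
    pvUntilBorder (grid.length + (grid.headD []).length + 2) x y dx dy grid
      = (PySem.List.pyRange 1 (k + 1) 1).map (fun i => ((x + i * dx, y + i * dy) : Int × Int)) := by
  have hKfuel : k.toNat < grid.length + (grid.headD []).length + 2 := by omega
  have hfail : pvValid (x + ((k.toNat : Int) + 1) * dx, y + ((k.toNat : Int) + 1) * dy) grid = false := by
    rw [Int.toNat_of_nonneg A1]; exact A3
  have hval : ∀ j : Nat, j < k.toNat →
      pvValid (x + ((j : Int) + 1) * dx, y + ((j : Int) + 1) * dy) grid = true := by
    intro j hj
    exact A2 ((j : Int) + 1) (by omega) (by omega)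
  rw [pvWalk_eq grid dx dy _ k.toNat x y hKfuel hval hfail]
  rw [PySem.List.pyRange_one, List.map_map]
  have hk1 : (k + 1 - 1) = k := by ring
  rw [hk1]
  apply List.map_congr_left
  intro j _
  simp only [Function.comp_apply, Prod.mk.injEq]
  constructor <;> (push_cast; ring)

theorem pvRay_eq_walk (grid : List (List String)) (x y dx dy : Int)
    (h0 : dx = 0 → dy = 0 → pvValid (x, y) grid = false) :
    pvUntilBorder (grid.length + (grid.headD []).length + 2) x y dx dy grid
      = pvRay x y dx dy (grid.length : Int) ((grid.headD []).length : Int) := by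
  have hn0 : (0 : Int) ≤ (grid.length : Int) := Int.natCast_nonneg _
  have hm0 : (0 : Int) ≤ ((grid.headD []).length : Int) := Int.natCast_nonneg _
  unfold pvRay
  cases hcx : pvAxisCap x dx (grid.length : Int) with
  | none =>
    cases hcy : pvAxisCap y dy ((grid.headD []).length : Int) with
    | none =>
      exfalso
      obtain ⟨hdx, hx0, hx1⟩ := pvCap_none _ _ _ hcx
      obtain ⟨hdy, hy0, hy1⟩ := pvCap_none _ _ _ hcy
      have := h0 hdx hdy
      rw [pvValid_false_iff] at this
      exact this ⟨hx0, hx1, hy0, hy1⟩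
    | some b =>
      obtain ⟨hdx, hx0, hx1⟩ := pvCap_none _ _ _ hcx
      subst hdx
      dsimp only
      apply pvClose
      · exact pvCap_nonneg _ _ _ _ hcy
      · intro j hj1 hj2
        rw [pvValid_true_iff]
        have hy := pvCap_valid _ _ _ _ hcy j hj1 hj2
        exact ⟨by omega, by omega, hy.1, hy.2⟩
      · rw [pvValid_false_iff]
        rintro ⟨_, _, hy2, hy3⟩
        exact pvCap_fail _ _ _ _ hcy ⟨hy2, hy3⟩
      · have := pvCap_le _ _ _ _ hcy hm0; omega
  | some a =>
    cases hcy : pvAxisCap y dy ((grid.headD []).length : Int) with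
    | none =>
      obtain ⟨hdy, hy0, hy1⟩ := pvCap_none _ _ _ hcy
      subst hdy
      dsimp only
      apply pvClose
      · exact pvCap_nonneg _ _ _ _ hcx
      · intro j hj1 hj2
        rw [pvValid_true_iff]
        have hx := pvCap_valid _ _ _ _ hcx j hj1 hj2
        exact ⟨hx.1, hx.2, by omega, by omega⟩
      · rw [pvValid_false_iff]
        rintro ⟨hx2, hx3, _, _⟩
        exact pvCap_fail _ _ _ _ hcx ⟨hx2, hx3⟩
      · have := pvCap_le _ _ _ _ hcx hn0; omega
    | some b =>
      have ha0 := pvCap_nonneg _ _ _ _ hcx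
      have hb0 := pvCap_nonneg _ _ _ _ hcy
      dsimp only
      apply pvClose
      · exact le_min ha0 hb0
      · intro j hj1 hj2
        rw [pvValid_true_iff]
        have hx := pvCap_valid _ _ _ _ hcx j hj1 (le_trans hj2 (min_le_left a b))
        have hy := pvCap_valid _ _ _ _ hcy j hj1 (le_trans hj2 (min_le_right a b))
        exact ⟨hx.1, hx.2, hy.1, hy.2⟩
      · rw [pvValid_false_iff]
        rcases min_choice a b with hmin | hmin <;> rw [hmin]
        · rintro ⟨hx2, hx3, _, _⟩
          exact pvCap_fail _ _ _ _ hcx ⟨hx2, hx3⟩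
        · rintro ⟨_, _, hy2, hy3⟩
          exact pvCap_fail _ _ _ _ hcy ⟨hy2, hy3⟩
      · have h1 := pvCap_le _ _ _ _ hcx hn0
        have h2 := min_le_left a b
        omega

theorem pvFlatMap_congr {α β : Type} (l : List α) (f g : α → List β)
    (h : ∀ a ∈ l, f a = g a) : l.flatMap f = l.flatMap g := by
  induction l with
  | nil => rfl
  | cons a t ih =>
    rw [List.flatMap_cons, List.flatMap_cons, h a (by simp), ih (fun a ha => h a (by simp [ha]))]

theorem pvInner_fold {α : Type} (f1 f2 : α → List (Int × Int)) (key : String) :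
    ∀ (l : List α) (d : PySem.Dict String (List (Int × Int))) (v0 : List (Int × Int)),
    l.foldl (fun a pr => (a.modify key [] (· ++ f1 pr)).modify key [] (· ++ f2 pr)) (d.insert key v0)
      = d.insert key (v0 ++ l.flatMap (fun pr => f1 pr ++ f2 pr)) := by
  intro l
  induction l with
  | nil => intro d v0; simp
  | cons h t ih =>
    intro d v0
    rw [List.foldl_cons]
    have hstep : ((d.insert key v0).modify key [] (· ++ f1 h)).modify key [] (· ++ f2 h)
        = d.insert key ((v0 ++ f1 h) ++ f2 h) := by
      simp only [pvModify_eq_insert, PySem.Dict.getD_insert_self, PySem.Dict.insert_insert_self]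
    rw [hstep, ih, List.flatMap_cons]
    simp [List.append_assoc]

theorem pvOuter (combos : List (String × List ((Int × Int) × (Int × Int)))) (distances : List (String × List (Int × Int))) (grid : List (List String)) :
    ∀ (ks : List String) (acc : PySem.Dict String (List (Int × Int))),
    ks.Nodup →
    (∀ k ∈ ks, acc.contains k = false) →
    (∀ k ∈ ks, ∀ pr ∈ List.zip ((PySem.Dict.mk combos).getD k []) ((PySem.Dict.mk distances).getD k []),
      pr.2 = ((0 : Int), (0 : Int)) → ¬ pvInGrid pr.1.1 grid ∧ ¬ pvInGrid pr.1.2 grid) →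
    ks.foldl
      (fun (an : PySem.Dict String (List (Int × Int))) key =>
        (List.zip ((PySem.Dict.mk combos).getD key []) ((PySem.Dict.mk distances).getD key [])).foldl
          (fun a pr =>
            (a.modify key [] (· ++ pvUntilBorder (grid.length + (grid.headD []).length + 2) pr.1.1.1 pr.1.1.2 (-pr.2.1) (-pr.2.2) grid)).modify key []
              (· ++ pvUntilBorder (grid.length + (grid.headD []).length + 2) pr.1.2.1 pr.1.2.2 pr.2.1 pr.2.2 grid))
          (an.setdefault key [])) acc
    = ks.foldl
      (fun (out : PySem.Dict String (List (Int × Int))) key =>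
        out.insert key
          ((List.zip ((PySem.Dict.mk combos).getD key []) ((PySem.Dict.mk distances).getD key [])).flatMap
            (fun pr => pvRay pr.1.1.1 pr.1.1.2 (-pr.2.1) (-pr.2.2) (grid.length : Int) ((grid.headD []).length : Int)
              ++ pvRay pr.1.2.1 pr.1.2.2 pr.2.1 pr.2.2 (grid.length : Int) ((grid.headD []).length : Int)))) acc := by
  intro ks
  induction ks with
  | nil => intro acc _ _ _; rfl
  | cons k t ih =>
    intro acc hnd hfresh hpre
    rw [List.foldl_cons, List.foldl_cons]
    have hsd : acc.setdefault k [] = acc.insert k ([] : List (Int × Int)) :=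
      PySem.Dict.setdefault_of_not_contains _ _ (hfresh k (by simp))
    rw [hsd, pvInner_fold, List.nil_append]
    have hpiece :
        (List.zip ((PySem.Dict.mk combos).getD k []) ((PySem.Dict.mk distances).getD k [])).flatMap
          (fun pr => pvUntilBorder (grid.length + (grid.headD []).length + 2) pr.1.1.1 pr.1.1.2 (-pr.2.1) (-pr.2.2) grid
            ++ pvUntilBorder (grid.length + (grid.headD []).length + 2) pr.1.2.1 pr.1.2.2 pr.2.1 pr.2.2 grid)
        = (List.zip ((PySem.Dict.mk combos).getD k []) ((PySem.Dict.mk distances).getD k [])).flatMap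
          (fun pr => pvRay pr.1.1.1 pr.1.1.2 (-pr.2.1) (-pr.2.2) (grid.length : Int) ((grid.headD []).length : Int)
            ++ pvRay pr.1.2.1 pr.1.2.2 pr.2.1 pr.2.2 (grid.length : Int) ((grid.headD []).length : Int)) := by
      apply pvFlatMap_congr
      intro pr hpr
      have hcond := hpre k (by simp) pr hpr
      have hfirst : pvUntilBorder (grid.length + (grid.headD []).length + 2) pr.1.1.1 pr.1.1.2 (-pr.2.1) (-pr.2.2) grid
          = pvRay pr.1.1.1 pr.1.1.2 (-pr.2.1) (-pr.2.2) (grid.length : Int) ((grid.headD []).length : Int) := by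
        apply pvRay_eq_walk
        intro h1 h2
        rw [pvValid_false_iff]
        exact (hcond (Prod.ext (by omega) (by omega))).1
      have hsecond : pvUntilBorder (grid.length + (grid.headD []).length + 2) pr.1.2.1 pr.1.2.2 pr.2.1 pr.2.2 grid
          = pvRay pr.1.2.1 pr.1.2.2 pr.2.1 pr.2.2 (grid.length : Int) ((grid.headD []).length : Int) := by
        apply pvRay_eq_walk
        intro h1 h2
        rw [pvValid_false_iff]
        exact (hcond (Prod.ext h1 h2)).2
      rw [hfirst, hsecond]
    rw [hpiece]
    apply ih
    · exact (List.nodup_cons.mp hnd).2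
    · intro k' hk'
      have hne : k' ≠ k := by
        intro hEq; subst hEq; exact (List.nodup_cons.mp hnd).1 hk'
      rw [PySem.Dict.contains_insert]
      simp [hne, hfresh k' (by simp [hk'])]
    · intro k' hk'
      exact hpre k' (by simp [hk'])

-- ===== VERDICT (by name: the statement is the Claim_ definition above) =====
theorem find_resonant_spec : Claim_equal_find_resonant := by
  intro combos distances grid _ hpre
  obtain ⟨hnd, hkey⟩ := hpre
  unfold Spec_find_resonant find_resonant find_resonant_alt
  have hm : (if grid.isEmpty then (0 : Int) else ((grid.headD []).length : Int))
      = ((grid.headD []).length : Int) := by cases grid <;> simp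
  simp only [hm]
  exact congrArg PySem.Dict.items
    (pvOuter combos distances grid (combos.map Prod.fst) PySem.Dict.empty hnd
      (fun k _ => by simp)
      (fun k hk => (hkey k hk).2))
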